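-- pv_equiv track=rewrite | github.com/wannabetter/LeetCode | 2457.py | makeIntegerBeautiful
-- ===== SOURCE A (Python) =====
-- def makeIntegerBeautiful(n: int, target: int) -> int:
--     Tail = 1
--     while True:
--         Temp = Num = n + (Tail - n % Tail) % Tail  # 有一种特殊情况，比如n个位是0，模10之后又是0，Tail-0还是等与Tail，再模一个Tail就等于0
--         # 防止进位，这样做可以防止不该进位的时候进位
--         S = 0
--         while Num:
--             S += Num % 10
--             Num = Num // 10
--         if S <= target:
--             return Temp - n
--         Tail *= 10
-- ===== SOURCE B (Python) =====
-- def makeIntegerBeautiful(n: int, target: int) -> int: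
--     # Digit-array algorithm: decompose n once into its decimal digits (LSB first),
--     # keep the digit sum incrementally, and strip one digit per round, propagating
--     # a +1 carry through the array; rebuild the numeric answer only at the end.
--     D = []
--     m = n
--     while m:
--         D.append(m % 10)
--         m //= 10
--     s = sum(D)
--     if s <= target:
--         return 0
--     tens = 1
--     while True:
--         d0 = D.pop(0) if D else 0
--         tens *= 10
--         s -= d0
--         if d0:
--             i = 0
--             while i < len(D) and D[i] == 9:
--                 D[i] = 0
--                 s -= 9
--                 i += 1
--             if i < len(D):
--                 D[i] += 1
--             else:
--                 D.append(1)
--             s += 1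
--         if s <= target:
--             h = 0
--             for d in reversed(D):
--                 h = h * 10 + d
--             return h * tens - n
-- ===== Notes on version B (the rewrite author's own statement) =====
-- stated objective: alternative
-- what changed: B decomposes n once into a decimal digit array, maintains the digit sum incrementally, and per round pops the lowest digit and propagates a +1 carry in place through the array (amortized O(1) digit work per round), rebuilding the numeric answer only at the end; A instead recomputes a full modular round-up candidate n + (Tail - n%Tail)%Tail from n and rescans all of its digits every iteration.
import Mathlib
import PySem

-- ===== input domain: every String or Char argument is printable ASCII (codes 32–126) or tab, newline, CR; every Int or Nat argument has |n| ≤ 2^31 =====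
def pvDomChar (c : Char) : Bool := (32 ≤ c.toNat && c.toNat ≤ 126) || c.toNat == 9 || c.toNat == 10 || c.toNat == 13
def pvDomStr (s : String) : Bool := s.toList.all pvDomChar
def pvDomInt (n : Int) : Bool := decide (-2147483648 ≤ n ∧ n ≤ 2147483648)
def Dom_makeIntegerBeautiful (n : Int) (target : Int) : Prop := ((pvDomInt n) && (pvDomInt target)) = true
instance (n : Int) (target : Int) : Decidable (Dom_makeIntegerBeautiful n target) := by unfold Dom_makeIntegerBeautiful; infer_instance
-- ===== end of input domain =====

-- B replaces A's per-iteration modular round-up candidate (recomputed from n and rescanned digit by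
-- digit each pass) with a decimal digit array traversed once: the digit sum is kept incrementally and
-- each round pops the lowest digit and propagates a +1 carry in place (objective: alternative; no
-- measured speed claim).

-- ===== PORT A =====
-- Python's inner `while Num:` digit-sum loop; the fuel num.natAbs + 1 bounds the iteration count
-- whenever num ≥ 0 (under Pre_ every Num it is called on is ≥ 0; on num < 0 Python never returns).
def pyDigitLoop : Nat → Int → Int → Int
  | 0, _, s => s
  | f + 1, num, s =>
      if num = 0 then s
      else pyDigitLoop f (PySem.Int.floordiv num 10) (s + PySem.Int.mod num 10)

def pyDigitSum (num : Int) : Int := pyDigitLoop (num.natAbs + 1) num 0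

-- A's `while True:` loop; under Pre_ the fuel n.natAbs + 3 exceeds the number of iterations
-- (Tail need never pass 10^(digits of n)), so the 0-fuel branch is unreachable.
def mibLoopA (n target : Int) : Nat → Int → Int
  | 0, _ => 0
  | f + 1, tail =>
      let temp := n + PySem.Int.mod (tail - PySem.Int.mod n tail) tail
      if pyDigitSum temp ≤ target then temp - n
      else mibLoopA n target f (tail * 10)

def makeIntegerBeautiful (n : Int) (target : Int) : Int :=
  mibLoopA n target (n.natAbs + 3) 1

-- ===== PORT B =====
-- B's digit-decomposition loop `while m: D.append(m % 10); m //= 10`; fuel m.natAbs + 1 bounds the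
-- iterations whenever m ≥ 0.
def mibDigits : Nat → Int → List Int → List Int
  | 0, _, d => d
  | f + 1, m, d =>
      if m = 0 then d
      else mibDigits f (PySem.Int.floordiv m 10) (d ++ [PySem.Int.mod m 10])

-- B's inner carry loop (`while i < len(D) and D[i] == 9: …` then the `+= 1`/append), which only ever
-- touches the front of the remaining digit list; returns the updated list and updated running sum s.
def mibCarry : List Int → Int → List Int × Int
  | [], s => ([1], s + 1)
  | d :: r, s =>
      if d = 9 then
        let p := mibCarry r (s - 9)
        (0 :: p.1, p.2)
      else ((d + 1) :: r, s + 1)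

-- B's final `for d in reversed(D): h = h * 10 + d`.
def mibVal (d : List Int) : Int := d.reverse.foldl (fun h x => h * 10 + x) 0

-- B's `while True:` loop over the state (D, s, tens); under Pre_ the fuel n.natAbs + 2 exceeds the
-- number of iterations.
def mibLoopB (n target : Int) : Nat → List Int → Int → Int → Int
  | 0, _, _, _ => 0
  | f + 1, d, s, tens =>
      let d0 := d.headD 0
      let d1 := d.tail
      let tens' := tens * 10
      let s1 := s - d0
      let p := if d0 ≠ 0 then mibCarry d1 s1 else (d1, s1)
      if p.2 ≤ target then mibVal p.1 * tens' - n
      else mibLoopB n target f p.1 p.2 tens'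

def makeIntegerBeautiful_alt (n : Int) (target : Int) : Int :=
  let d := mibDigits (n.natAbs + 1) n []
  let s := d.foldl (fun a b => a + b) 0
  if s ≤ target then 0
  else mibLoopB n target (n.natAbs + 2) d s 1

-- ===== PRECONDITION & SPEC =====
-- Pre_ excludes exactly the inputs on which A never returns (it diverges, raising nothing):
-- negative n (A's inner `while Num` loop never terminates on negative Num), and targets the digit
-- sum can never meet (n ≥ 1 with target < 1, or n = 0 with target < 0).
def Pre_makeIntegerBeautiful (n : Int) (target : Int) : Prop :=
  0 ≤ n ∧ (1 ≤ target ∨ (n = 0 ∧ 0 ≤ target))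
instance (n : Int) (target : Int) : Decidable (Pre_makeIntegerBeautiful n target) := by
  unfold Pre_makeIntegerBeautiful; infer_instance

def pvWitness_makeIntegerBeautiful : Int × Int := (467, 6)

def Spec_makeIntegerBeautiful (n : Int) (target : Int) (out : Int) : Prop := out = makeIntegerBeautiful_alt n target
instance (n : Int) (target : Int) (out : Int) : Decidable (Spec_makeIntegerBeautiful n target out) := by unfold Spec_makeIntegerBeautiful; infer_instance

-- ===== CLAIM (what is proved, stated in full; the proofs are below) =====
def Claim_equal_makeIntegerBeautiful : Prop := ∀ (n : Int) (target : Int), Dom_makeIntegerBeautiful n target → Pre_makeIntegerBeautiful n target → Spec_makeIntegerBeautiful n target (makeIntegerBeautiful n target)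

-- ===== LEMMAS AND PROOFS =====

-- Nat-level digit sum and ceiling division, and Nat models of the two loops
def dsN (m : Nat) : Nat :=
  if h : m = 0 then 0 else m % 10 + dsN (m / 10)
decreasing_by exact Nat.div_lt_self (Nat.pos_of_ne_zero h) (by norm_num)

def cdiv (a b : Nat) : Nat := (a + b - 1) / b

def aM (n : Nat) (t : Int) : Nat → Nat → Int
  | 0, _ => 0
  | f + 1, p =>
      if (dsN (cdiv n p) : Int) ≤ t then ((cdiv n p * p : Nat) : Int) - n
      else aM n t f (p * 10)

def bM (n : Nat) (t : Int) : Nat → Nat → Nat → Int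
  | 0, _, _ => 0
  | f + 1, h, tens =>
      if (dsN (cdiv h 10) : Int) ≤ t then ((cdiv h 10 * (tens * 10) : Nat) : Int) - n
      else bM n t f (cdiv h 10) (tens * 10)

lemma cdiv_le_iff {a b m : Nat} (hb : 0 < b) : cdiv a b ≤ m ↔ a ≤ m * b := by
  unfold cdiv
  rw [Nat.div_le_iff_le_mul_add_pred hb, Nat.mul_comm m b]
  generalize b * m = q
  omega
lemma le_cdiv_mul {a b : Nat} (hb : 0 < b) : a ≤ cdiv a b * b := (cdiv_le_iff hb).1 le_rfl
lemma lt_cdiv_iff {a b m : Nat} (hb : 0 < b) : m < cdiv a b ↔ m * b < a := by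
  rw [← Nat.not_le, ← Nat.not_le, cdiv_le_iff hb]
lemma cdiv_comp (n p : Nat) (hp : 0 < p) : cdiv n (p * 10) = cdiv (cdiv n p) 10 := by
  apply Nat.le_antisymm
  · rw [cdiv_le_iff (by omega)]
    calc n ≤ cdiv n p * p := le_cdiv_mul hp
    _ ≤ (cdiv (cdiv n p) 10 * 10) * p := Nat.mul_le_mul_right _ (le_cdiv_mul (by omega))
    _ = cdiv (cdiv n p) 10 * (p * 10) := by ring
  · rw [cdiv_le_iff (by omega), cdiv_le_iff hp]
    calc n ≤ cdiv n (p * 10) * (p * 10) := le_cdiv_mul (by omega)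
    _ = cdiv n (p * 10) * 10 * p := by ring
lemma cdiv_eq {N p : Nat} (hp : 0 < p) : cdiv N p = N / p + (if N % p = 0 then 0 else 1) := by
  have hdm := Nat.div_add_mod' N p
  have hr : N % p < p := Nat.mod_lt _ hp
  apply Nat.le_antisymm
  · rw [cdiv_le_iff hp]
    split
    · simp only [Nat.add_zero]; omega
    · have : (N / p + 1) * p = N / p * p + p := by ring
      omega
  · split
    · have h1 : N / p * p ≤ cdiv N p * p := by
        have := le_cdiv_mul (a := N) hp
        omega
      simpa using Nat.le_of_mul_le_mul_right h1 hp
    · have h2 : N / p < cdiv N p := by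
        rw [lt_cdiv_iff hp]; omega
      omega
lemma roundup_eq (N p : Nat) (hp : 0 < p) : N + (p - N % p) % p = cdiv N p * p := by
  have hdm := Nat.div_add_mod' N p
  have hr : N % p < p := Nat.mod_lt _ hp
  rw [cdiv_eq hp]
  rcases Nat.eq_zero_or_pos (N % p) with h0 | h0
  · simp [h0]
    omega
  · have h1 : (p - N % p) % p = p - N % p := Nat.mod_eq_of_lt (by omega)
    have h2 : N % p ≠ 0 := by omega
    simp only [h2, if_false]
    have : (N / p + 1) * p = N / p * p + p := by ring
    omega

lemma cdiv_one (N : Nat) : cdiv N 1 = N := by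
  unfold cdiv; simp

lemma dsN_zero : dsN 0 = 0 := by simp [dsN]
lemma dsN_unfold {m : Nat} (h : m ≠ 0) : dsN m = m % 10 + dsN (m / 10) := by
  rw [dsN]; simp [h]
lemma dsN_mul10 (m : Nat) : dsN (m * 10) = dsN m := by
  rcases Nat.eq_zero_or_pos m with h | h
  · simp [h]
  · rw [dsN_unfold (by omega)]
    have h2 : m * 10 % 10 = 0 := by omega
    have h3 : m * 10 / 10 = m := by omega
    rw [h2, h3, Nat.zero_add]
lemma dsN_succ_of_ne_nine {m : Nat} (h : m % 10 ≠ 9) : dsN (m + 1) = dsN m + 1 := by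
  rcases Nat.eq_zero_or_pos m with h0 | h0
  · subst h0; rw [dsN_unfold (by omega)]; norm_num [dsN_zero]
  · rw [dsN_unfold (show m + 1 ≠ 0 by omega), dsN_unfold (show m ≠ 0 by omega)]
    have h1 : (m + 1) % 10 = m % 10 + 1 := by omega
    have h2 : (m + 1) / 10 = m / 10 := by omega
    rw [h1, h2]; omega
lemma dsN_one : dsN 1 = 1 := by rw [dsN_unfold (by omega)]; norm_num [dsN_zero]
lemma dsN_pow10_mul (k : Nat) : ∀ m, dsN (m * 10 ^ k) = dsN m := by
  induction k with
  | zero => intro m; simp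
  | succ k ih =>
    intro m
    have h : m * 10 ^ (k + 1) = (m * 10) * 10 ^ k := by ring
    rw [h, ih (m * 10), dsN_mul10]

lemma pyDigitLoop_eq (N : Nat) : ∀ f s, N < f → pyDigitLoop f (N : Int) s = s + (dsN N : Int) := by
  induction N using Nat.strong_induction_on with
  | _ N ih =>
    intro f s hf
    match f with
    | f + 1 =>
      rcases Nat.eq_zero_or_pos N with h0 | h0
      · subst h0; simp [pyDigitLoop, dsN_zero]
      · have hne : ((N : Int) ≠ 0) := by exact_mod_cast (by omega : N ≠ 0)
        have e1 : PySem.Int.floordiv (N : Int) 10 = ((N / 10 : Nat) : Int) := by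
          exact_mod_cast PySem.Int.floordiv_natCast N 10
        have e2 : PySem.Int.mod (N : Int) 10 = ((N % 10 : Nat) : Int) := by
          exact_mod_cast PySem.Int.mod_natCast N 10
        rw [pyDigitLoop]
        simp only [hne, if_false, e1, e2]
        rw [ih (N / 10) (Nat.div_lt_self h0 (by norm_num)) f (s + ((N % 10 : Nat) : Int)) (by omega)]
        have hd : dsN N = N % 10 + dsN (N / 10) := dsN_unfold (by omega)
        rw [hd]
        push_cast
        ring
lemma pyDigitSum_natCast (N : Nat) : pyDigitSum (N : Int) = (dsN N : Int) := by
  have h := pyDigitLoop_eq N (N + 1) 0 (by omega)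
  simpa [pyDigitSum] using h
lemma temp_eq (N p : Nat) (hp : 0 < p) :
    (N : Int) + PySem.Int.mod ((p : Int) - PySem.Int.mod (N : Int) (p : Int)) (p : Int)
      = ((cdiv N p * p : Nat) : Int) := by
  have hle : N % p ≤ p := le_of_lt (Nat.mod_lt _ hp)
  rw [PySem.Int.mod_natCast N p, ← Nat.cast_sub hle, PySem.Int.mod_natCast]
  rw [← Nat.cast_add, roundup_eq N p hp]

lemma mibLoopA_eq_aM (N : Nat) (t : Int) :
    ∀ f k, mibLoopA (N : Int) t f ((10 ^ k : Nat) : Int) = aM N t f (10 ^ k) := by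
  intro f
  induction f with
  | zero => intro k; simp [mibLoopA, aM]
  | succ f ih =>
    intro k
    rw [mibLoopA, aM]
    rw [temp_eq N (10 ^ k) (by positivity), pyDigitSum_natCast, dsN_pow10_mul k (cdiv N (10 ^ k))]
    have hrec : ((10 ^ k : Nat) : Int) * 10 = ((10 ^ (k + 1) : Nat) : Int) := by
      push_cast [pow_succ]; ring
    rw [hrec, ih (k + 1)]
    simp [pow_succ]

-- B-side: the digit list of a Nat, as Ints (LSB first), and its basic facts
def digitsI (m : Nat) : List Int := (Nat.digits 10 m).map (fun d => (d : Int))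

lemma digitsI_zero : digitsI 0 = [] := by simp [digitsI]
lemma digitsI_cons {m : Nat} (h : 0 < m) :
    digitsI m = ((m % 10 : Nat) : Int) :: digitsI (m / 10) := by
  unfold digitsI
  rw [Nat.digits_def' (by norm_num : 1 < 10) h]
  simp

lemma mibDigits_eq (N : Nat) : ∀ f acc, N < f → mibDigits f (N : Int) acc = acc ++ digitsI N := by
  induction N using Nat.strong_induction_on with
  | _ N ih =>
    intro f acc hf
    match f with
    | f + 1 =>
      rcases Nat.eq_zero_or_pos N with h0 | h0
      · subst h0; simp [mibDigits, digitsI_zero]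
      · have hne : ((N : Int) ≠ 0) := by exact_mod_cast (by omega : N ≠ 0)
        have e1 : PySem.Int.floordiv (N : Int) 10 = ((N / 10 : Nat) : Int) := by
          exact_mod_cast PySem.Int.floordiv_natCast N 10
        have e2 : PySem.Int.mod (N : Int) 10 = ((N % 10 : Nat) : Int) := by
          exact_mod_cast PySem.Int.mod_natCast N 10
        rw [mibDigits]
        simp only [hne, if_false, e1, e2]
        rw [ih (N / 10) (Nat.div_lt_self h0 (by norm_num)) f _ (by omega),
          digitsI_cons h0, List.append_assoc]
        simp

lemma foldl_digitsI (N : Nat) : ∀ s, (digitsI N).foldl (fun a b => a + b) s = s + (dsN N : Int) := by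
  induction N using Nat.strong_induction_on with
  | _ N ih =>
    intro s
    rcases Nat.eq_zero_or_pos N with h0 | h0
    · subst h0; simp [digitsI_zero, dsN_zero]
    · rw [digitsI_cons h0, List.foldl_cons,
        ih (N / 10) (Nat.div_lt_self h0 (by norm_num)), dsN_unfold (by omega : N ≠ 0)]
      push_cast
      ring

lemma mibVal_digitsI (N : Nat) : mibVal (digitsI N) = (N : Int) := by
  induction N using Nat.strong_induction_on with
  | _ N ih =>
    rcases Nat.eq_zero_or_pos N with h0 | h0
    · subst h0; simp [digitsI_zero, mibVal]
    · have hrw : ∀ (l : List Int), mibVal l = l.foldr (fun x y => y * 10 + x) 0 := by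
        intro l
        unfold mibVal
        rw [List.foldl_reverse]
      rw [hrw, digitsI_cons h0, List.foldr_cons, ← hrw,
        ih (N / 10) (Nat.div_lt_self h0 (by norm_num))]
      push_cast
      omega

lemma mibCarry_digitsI (m : Nat) : ∀ s : Int,
    mibCarry (digitsI m) s = (digitsI (m + 1), s - (dsN m : Int) + (dsN (m + 1) : Int)) := by
  induction m using Nat.strong_induction_on with
  | _ m ih =>
    intro s
    rcases Nat.eq_zero_or_pos m with h0 | h0
    · subst h0
      have h1 : digitsI 1 = [(1 : Int)] := by
        rw [digitsI_cons (by norm_num)]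
        norm_num [digitsI_zero]
      simp [digitsI_zero, mibCarry, h1, dsN_zero, dsN_one]
    · rw [digitsI_cons h0, mibCarry]
      by_cases h9 : m % 10 = 9
      · have hc : ((m % 10 : Nat) : Int) = 9 := by rw [h9]; norm_num
        simp only [hc, if_true]
        rw [ih (m / 10) (Nat.div_lt_self h0 (by norm_num)) (s - 9)]
        have e1 : (m + 1) % 10 = 0 := by omega
        have e2 : (m + 1) / 10 = m / 10 + 1 := by omega
        have hdg : digitsI (m + 1) = (0 : Int) :: digitsI (m / 10 + 1) := by
          rw [digitsI_cons (by omega), e1, e2]; norm_num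
        have hds1 : dsN (m + 1) = dsN (m / 10 + 1) := by
          rw [dsN_unfold (by omega : m + 1 ≠ 0), e1, e2]
          omega
        have hds2 : dsN m = 9 + dsN (m / 10) := by
          rw [dsN_unfold (by omega : m ≠ 0), h9]
        rw [hdg, hds1, hds2]
        simp only [Prod.mk.injEq]
        exact ⟨by simp, by push_cast; ring⟩
      · have hc : ((m % 10 : Nat) : Int) ≠ 9 := by
          intro h
          exact h9 (by exact_mod_cast h)
        rw [if_neg hc]
        have e1 : (m + 1) % 10 = m % 10 + 1 := by omega
        have e2 : (m + 1) / 10 = m / 10 := by omega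
        have hdg : digitsI (m + 1) = (((m % 10 : Nat) : Int) + 1) :: digitsI (m / 10) := by
          rw [digitsI_cons (by omega), e1, e2]
          push_cast
          norm_num
        rw [hdg, dsN_succ_of_ne_nine h9]
        simp only [Prod.mk.injEq]
        exact ⟨by simp, by push_cast; ring⟩

lemma mibLoopB_eq_bM (N : Nat) (t : Int) :
    ∀ f (h tens : Nat), 1 ≤ h →
      mibLoopB (N : Int) t f (digitsI h) ((dsN h : Nat) : Int) ((tens : Nat) : Int) = bM N t f h tens := by
  intro f
  induction f with
  | zero => intro h tens _; simp [mibLoopB, bM]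
  | succ f ih =>
    intro h tens hh
    rw [mibLoopB, bM]
    rw [digitsI_cons (by omega)]
    simp only [List.headD_cons, List.tail_cons]
    have hs1 : ((dsN h : Nat) : Int) - ((h % 10 : Nat) : Int) = ((dsN (h / 10) : Nat) : Int) := by
      rw [dsN_unfold (by omega : h ≠ 0)]
      push_cast
      ring
    by_cases hd0 : h % 10 = 0
    · have hc : ¬ (((h % 10 : Nat) : Int) ≠ 0) := by
        simp [hd0]
      simp only [hc, if_false, hs1]
      have hcd : cdiv h 10 = h / 10 := by rw [cdiv_eq (by norm_num)]; simp [hd0]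
      have hh' : 1 ≤ h / 10 := by omega
      have htens : ((tens : Nat) : Int) * 10 = ((tens * 10 : Nat) : Int) := by push_cast; ring
      rw [htens, hcd]
      by_cases hle : ((dsN (h / 10) : Nat) : Int) ≤ t
      · simp only [hle, if_true, mibVal_digitsI]
        push_cast
        ring
      · simp only [hle, if_false]
        exact ih (h / 10) (tens * 10) hh'
    · have hc : (((h % 10 : Nat) : Int) ≠ 0) := by
        exact_mod_cast hd0
      simp only [hc, ne_eq, not_false_iff, if_pos, hs1]
      rw [mibCarry_digitsI (h / 10)]
      have hsum : ((dsN (h / 10) : Nat) : Int) - (dsN (h / 10) : Int) + (dsN (h / 10 + 1) : Int)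
          = ((dsN (h / 10 + 1) : Nat) : Int) := by ring
      have hcd : cdiv h 10 = h / 10 + 1 := by rw [cdiv_eq (by norm_num)]; simp [hd0]
      have htens : ((tens : Nat) : Int) * 10 = ((tens * 10 : Nat) : Int) := by push_cast; ring
      rw [hsum, htens, hcd]
      by_cases hle : ((dsN (h / 10 + 1) : Nat) : Int) ≤ t
      · simp only [hle, if_true, mibVal_digitsI]
        push_cast
        ring
      · simp only [hle, if_false]
        exact ih (h / 10 + 1) (tens * 10) (by omega)

lemma bM_eq_aM (N : Nat) (t : Int) :
    ∀ f k, bM N t f (cdiv N (10 ^ k)) (10 ^ k) = aM N t f (10 ^ (k + 1)) := by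
  intro f
  induction f with
  | zero => intro k; simp [bM, aM]
  | succ f ih =>
    intro k
    rw [bM, aM]
    have hcomp : cdiv (cdiv N (10 ^ k)) 10 = cdiv N (10 ^ (k + 1)) := by
      rw [← cdiv_comp N (10 ^ k) (by positivity), pow_succ]
    have hpow : 10 ^ k * 10 = 10 ^ (k + 1) := by rw [pow_succ]
    rw [hcomp, hpow]
    by_cases hle : ((dsN (cdiv N (10 ^ (k + 1))) : Nat) : Int) ≤ t
    · simp only [hle, if_true]
    · simp only [hle, if_false]
      rw [ih (k + 1), pow_succ]

theorem glue (n t : Int) (h0 : 0 ≤ n) (hT : 1 ≤ t ∨ (n = 0 ∧ 0 ≤ t)) :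
    makeIntegerBeautiful n t = makeIntegerBeautiful_alt n t := by
  obtain ⟨N, rfl⟩ := Int.eq_ofNat_of_zero_le h0
  have hna : (Int.natAbs (N : Int)) = N := Int.natAbs_natCast N
  have hA : makeIntegerBeautiful (N : Int) t = aM N t (N + 3) 1 := by
    unfold makeIntegerBeautiful
    rw [hna, show (1 : Int) = ((10 ^ 0 : Nat) : Int) by norm_num,
      mibLoopA_eq_aM N t (N + 3) 0]
    norm_num
  have hDig : mibDigits (Int.natAbs (N : Int) + 1) (N : Int) [] = digitsI N := by
    rw [hna]
    simpa using mibDigits_eq N (N + 1) [] (by omega)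
  have hSum : (digitsI N).foldl (fun a b => a + b) 0 = (dsN N : Int) := by
    simpa using foldl_digitsI N 0
  by_cases hds : (dsN N : Int) ≤ t
  · have hB : makeIntegerBeautiful_alt (N : Int) t = 0 := by
      simp only [makeIntegerBeautiful_alt, hDig, hSum]
      simp [hds]
    rw [hA, hB, aM, cdiv_one]
    simp [hds]
  · have hN1 : 1 ≤ N := by
      rcases Nat.eq_zero_or_pos N with h | h
      · exfalso
        have ht0 : (0 : Int) ≤ t := by rcases hT with h1 | ⟨_, h2⟩ <;> omega
        rw [h, dsN_zero] at hds
        push_cast at hds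
        omega
      · omega
    have hB : makeIntegerBeautiful_alt (N : Int) t = bM N t (N + 2) N 1 := by
      simp only [makeIntegerBeautiful_alt, hDig, hSum]
      simp only [hds, if_false]
      rw [hna, show (1 : Int) = ((1 : Nat) : Int) by norm_num]
      exact mibLoopB_eq_bM N t (N + 2) N 1 hN1
    rw [hA, hB, aM, cdiv_one]
    simp only [hds, if_false]
    have := bM_eq_aM N t (N + 2) 0
    rw [pow_zero, cdiv_one, pow_one] at this
    rw [this]

-- ===== VERDICT (by name: the statement is the Claim_ definition above) =====
theorem makeIntegerBeautiful_spec : Claim_equal_makeIntegerBeautiful := by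
  intro n target _ hpre
  unfold Spec_makeIntegerBeautiful
  exact glue n target hpre.1 hpre.2
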